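-- pv_equiv track=rewrite | github.com/JongKyuHong/today_learn | 알고리즘/20210423/target number.py | solution
-- ===== SOURCE A (Python) =====
-- def solution(numbers,target):
--     sup = [0]
--     for i in numbers:
--         sub = []
--         for j in sup:
--             sub.append(j+1)
--             sub.append(j-1)
--         sup = sub
--     return sup.count(target)
-- ===== SOURCE B (Python) =====
-- def solution(numbers, target):
--     # Closed form: result counts +-1 sign sequences of length n summing to target,
--     # i.e. C(n, (n+target)/2) when parity and range allow, else 0.
--     n = len(numbers)
--     if (n + target) % 2 != 0 or target > n or target < -n:
--         return 0
--     k = (n + target) // 2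
--     c = 1
--     for i in range(k):
--         c = c * (n - i) // (i + 1)
--     return c
-- ===== Notes on version B (the rewrite author's own statement) =====
-- stated objective: faster
-- what changed: A enumerates all 2^n sums of +-1 assignments and counts the target; B returns the closed-form binomial coefficient C(n,(n+target)/2) (0 when parity or range fails) computed by an O(n) product loop; intended as faster (measured 14.9x at n=16; A times out at n=64).
import Mathlib
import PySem

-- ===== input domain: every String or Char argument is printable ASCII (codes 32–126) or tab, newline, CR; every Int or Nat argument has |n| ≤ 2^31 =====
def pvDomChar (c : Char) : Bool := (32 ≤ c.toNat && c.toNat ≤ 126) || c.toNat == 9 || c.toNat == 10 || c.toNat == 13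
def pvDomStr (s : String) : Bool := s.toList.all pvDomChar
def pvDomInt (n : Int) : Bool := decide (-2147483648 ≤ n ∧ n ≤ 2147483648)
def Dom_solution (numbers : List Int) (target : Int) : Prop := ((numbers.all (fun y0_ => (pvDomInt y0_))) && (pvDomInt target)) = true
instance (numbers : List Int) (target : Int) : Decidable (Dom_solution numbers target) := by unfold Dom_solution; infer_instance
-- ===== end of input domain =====

-- B replaces A's exponential enumeration of all ±1 assignments by the closed-form
-- binomial coefficient C(n, (n+target)/2) computed in one product loop
-- (intended as faster; measured 14.9x at n=16, A timed out at n=64).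

-- ===== PORT A =====
def solution (numbers : List Int) (target : Int) : Int :=
  -- sup = [0]; for i in numbers: sub = []; for j in sup: sub.append(j+1); sub.append(j-1); sup = sub
  let sup : List Int :=
    numbers.foldl (fun sup _i => sup.foldl (fun sub j => sub ++ [j + 1] ++ [j - 1]) []) [0]
  -- return sup.count(target)
  (PySem.List.count sup target : Int)

-- ===== PORT B =====
def solution_alt (numbers : List Int) (target : Int) : Int :=
  let n : Int := numbers.length
  if PySem.Int.mod (n + target) 2 ≠ 0 ∨ target > n ∨ target < -n then 0
  else
    let k := PySem.Int.floordiv (n + target) 2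
    (PySem.List.pyRange 0 k 1).foldl (fun c i => PySem.Int.floordiv (c * (n - i)) (i + 1)) 1

-- ===== PRECONDITION & SPEC =====
def Spec_solution (numbers : List Int) (target : Int) (out : Int) : Prop := out = solution_alt numbers target
instance (numbers : List Int) (target : Int) (out : Int) : Decidable (Spec_solution numbers target out) := by unfold Spec_solution; infer_instance

-- ===== CLAIM (what is proved, stated in full; the proofs are below) =====
def Claim_equal_solution : Prop := ∀ (numbers : List Int) (target : Int), Dom_solution numbers target → Spec_solution numbers target (solution numbers target)

-- ===== LEMMAS AND PROOFS =====

-- The closed form: number of ±1-sequences of length n with sum t.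
def W (n : Nat) (t : Int) : Int :=
  if ((n : Int) + t) % 2 = 0 ∧ -(n : Int) ≤ t ∧ t ≤ (n : Int) then
    (n.choose (((n : Int) + t) / 2).toNat : Int)
  else 0

-- one doubling step, counted
lemma count_flatMap_step (l : List Int) (t : Int) :
    (l.flatMap (fun j => [j + 1] ++ [j - 1])).count t = l.count (t - 1) + l.count (t + 1) := by
  induction l with
  | nil => simp
  | cons a l ih =>
    simp only [List.flatMap_cons, List.count_append, List.count_cons, List.count_nil, ih,
      beq_iff_eq]
    split_ifs <;> omega

-- Pascal's rule for W
lemma W_succ (n : Nat) (t : Int) : W (n + 1) t = W n (t - 1) + W n (t + 1) := by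
  unfold W
  push_cast
  by_cases hp : ((n : Int) + 1 + t) % 2 = 0
  · by_cases hr : -((n : Int) + 1) ≤ t ∧ t ≤ (n : Int) + 1
    · rw [if_pos ⟨hp, hr.1, hr.2⟩]
      by_cases ht1 : t = (n : Int) + 1
      · subst ht1
        rw [if_pos (by constructor <;> [omega; omega]),
            if_neg (by omega)]
        have e1 : (((n : Int) + 1 + ((n : Int) + 1)) / 2).toNat = n + 1 := by omega
        have e2 : (((n : Int) + ((n : Int) + 1 - 1)) / 2).toNat = n := by omega
        rw [e1, e2, Nat.choose_self, Nat.choose_self]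
        simp
      · by_cases ht2 : t = -((n : Int) + 1)
        · subst ht2
          rw [if_neg (by omega), if_pos (by constructor <;> [omega; omega])]
          have e1 : (((n : Int) + 1 + -((n : Int) + 1)) / 2).toNat = 0 := by omega
          have e2 : (((n : Int) + (-((n : Int) + 1) + 1)) / 2).toNat = 0 := by omega
          rw [e1, e2, Nat.choose_zero_right, Nat.choose_zero_right]
          simp
        · -- interior: parity forces -n+1 ≤ t ≤ n-1
          have hlo : -(n : Int) + 1 ≤ t := by omega
          have hhi : t ≤ (n : Int) - 1 := by omega
          rw [if_pos (by constructor <;> [omega; omega]),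
              if_pos (by constructor <;> [omega; omega])]
          set m : ℕ := (((n : Int) + (t - 1)) / 2).toNat with hm
          have h1 : (((n : Int) + 1 + t) / 2).toNat = m + 1 := by omega
          have h3 : (((n : Int) + (t + 1)) / 2).toNat = m + 1 := by omega
          rw [h1, h3, Nat.choose_succ_succ]
          push_cast
          ring
    · rw [if_neg (by tauto), if_neg (by omega), if_neg (by omega)]
      simp
  · rw [if_neg (by tauto), if_neg (by omega), if_neg (by omega)]
    simp

-- A's iterated doubling counted equals W
lemma A_eq_W (ns : List Int) (t : Int) :
    ((ns.foldl (fun sup _i => sup.foldl (fun sub j => sub ++ [j + 1] ++ [j - 1]) []) [0]).count t : Int)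
      = W ns.length t := by
  induction ns using List.reverseRecOn generalizing t with
  | nil =>
    simp only [List.foldl_nil, List.length_nil]
    unfold W
    by_cases ht : t = 0
    · subst ht; simp
    · rw [if_neg (by push_cast; omega)]
      simp only [List.count_cons, List.count_nil, beq_iff_eq]
      push_cast
      split_ifs <;> omega
  | append_singleton ns x ih =>
    rw [List.foldl_append]
    simp only [List.foldl_cons, List.foldl_nil]
    have hflat : ∀ (sup : List Int),
        sup.foldl (fun sub j => sub ++ [j + 1] ++ [j - 1]) [] = sup.flatMap (fun j => [j + 1] ++ [j - 1]) := by
      intro sup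
      have := PySem.List.foldl_append_eq_flatMap (fun j : Int => [j + 1] ++ [j - 1]) sup []
      simpa using this
    rw [hflat, count_flatMap_step, List.length_append, List.length_singleton, W_succ]
    push_cast
    rw [ih (t - 1), ih (t + 1)]

-- B's product loop computes the binomial coefficient
lemma binom_loop (n k : Nat) (hk : k ≤ n) :
    (PySem.List.pyRange 0 (k : Int) 1).foldl
      (fun c i => PySem.Int.floordiv (c * ((n : Int) - i)) (i + 1)) 1 = (n.choose k : Int) := by
  induction k with
  | zero => simp [PySem.List.pyRange_one_eq_nil]
  | succ k ih =>
    have hcast : ((k + 1 : Nat) : Int) = (k : Int) + 1 := by push_cast; ring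
    rw [hcast, PySem.List.pyRange_one_succ_right (by positivity), List.foldl_append,
        ih (by omega)]
    simp only [List.foldl_cons, List.foldl_nil]
    have hnk : ((n : Int) - (k : Int)) = ((n - k : Nat) : Int) := by
      have : k ≤ n := by omega
      omega
    rw [hnk]
    have : (n.choose k : Int) * ((n - k : Nat) : Int) = ((n.choose k * (n - k) : Nat) : Int) := by
      push_cast; ring
    rw [this]
    have hfd := PySem.Int.floordiv_natCast (n.choose k * (n - k)) (k + 1)
    have : ((k : Int) + 1) = ((k + 1 : Nat) : Int) := by push_cast; ring
    rw [this, hfd, ← Nat.choose_succ_right_eq, Nat.mul_div_cancel _ (by omega)]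

-- B equals W
lemma B_eq_W (numbers : List Int) (target : Int) :
    solution_alt numbers target = W numbers.length target := by
  have h2 : (0 : Int) < 2 := by norm_num
  simp only [solution_alt]
  unfold W
  rw [PySem.Int.mod_eq_emod_of_pos h2]
  by_cases hg : ((numbers.length : Int) + target) % 2 ≠ 0 ∨ target > (numbers.length : Int) ∨
      target < -(numbers.length : Int)
  · rw [if_pos hg, if_neg (by omega)]
  · rw [if_neg hg]
    push Not at hg
    obtain ⟨hp, hle, hge⟩ := hg
    rw [if_pos ⟨hp, by omega, hle⟩]
    rw [PySem.Int.floordiv_eq_ediv_of_pos h2]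
    have hk : (((numbers.length : Int) + target) / 2).toNat ≤ numbers.length := by omega
    have hkc : (((((numbers.length : Int) + target) / 2).toNat : Nat) : Int)
        = ((numbers.length : Int) + target) / 2 := by omega
    rw [← hkc]
    exact binom_loop numbers.length ((((numbers.length : Int)) + target) / 2).toNat hk

-- ===== VERDICT (by name: the statement is the Claim_ definition above) =====
theorem solution_spec : Claim_equal_solution := by
  intro numbers target _
  unfold Spec_solution solution
  rw [B_eq_W]
  simpa [PySem.List.count_eq] using A_eq_W numbers target
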